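-- pv_equiv track=rewrite | github.com/bpgold/CS115 | HW/HW 6/hw6.py | compressSingleBlock
-- ===== SOURCE A (Python) =====
-- def compressSingleBlock(S, counter):
--     '''counts the length of consecutive identical bits.
-- It returns the length of the consecutive block.'''
--     if len(S) == 1:
--         return 1
--     elif ((S[0] == '1') and ('0' not in S)) or (S[0] == '0') and ('1' not in S):
--         #If all bits are the same we should return the length of the string
--         return len(S)
--     elif S[0] == S[1]: #First two bits are identical we will count
--         counter = counter + 1
--         return compressSingleBlock(S[1:], counter) #recursive check
--     else:
--         return counter #End of consecutive identical bits reached so return length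
-- ===== SOURCE B (Python) =====
-- def compressSingleBlock(S, counter):
--     '''counts the length of consecutive identical bits.
-- It returns the length of the consecutive block.'''
--     n = len(S)
--     if (S[0] == '1' and '0' not in S) or (S[0] == '0' and '1' not in S):
--         return n
--     i = 0
--     while i + 1 < n and S[i] == S[i + 1]:
--         counter += 1
--         i += 1
--     if i + 1 == n:
--         return 1
--     return counter
-- ===== Notes on version B (the rewrite author's own statement) =====
-- stated objective: faster
-- what changed: Replaced the tail recursion that re-slices the string and re-runs the membership tests at every step by one hoisted membership check plus a single index-based scan of the leading run, with no slicing or recursion.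
import Mathlib
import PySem

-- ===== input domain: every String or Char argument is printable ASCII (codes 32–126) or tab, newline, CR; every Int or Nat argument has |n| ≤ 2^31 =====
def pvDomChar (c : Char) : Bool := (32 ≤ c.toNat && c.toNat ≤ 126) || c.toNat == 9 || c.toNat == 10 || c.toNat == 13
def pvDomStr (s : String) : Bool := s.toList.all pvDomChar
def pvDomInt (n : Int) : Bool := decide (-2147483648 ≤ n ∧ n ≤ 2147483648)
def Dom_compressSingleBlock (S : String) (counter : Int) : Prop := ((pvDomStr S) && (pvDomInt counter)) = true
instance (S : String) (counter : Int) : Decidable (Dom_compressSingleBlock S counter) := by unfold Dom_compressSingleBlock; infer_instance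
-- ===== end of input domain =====

-- B hoists the bit-membership test out of the loop and scans the leading run once with an
-- index loop (no slicing, no recursion), where A re-slices and re-scans membership at every
-- recursion step; equivalence is proved on all nonempty strings.


-- ===== PORT A =====
-- A's recursion transcribed on List Char (S[1:] = tail); the empty list (Python: IndexError,
-- excluded by Pre_) returns 0.
def pvGoA (l : List Char) (counter : Int) : Int :=
  if l.length = 1 then 1
  else if (l.headD ' ' = '1' ∧ '0' ∉ l) ∨ (l.headD ' ' = '0' ∧ '1' ∉ l) then (l.length : Int)
  else
    match l with
    | c0 :: c1 :: rest => if c0 = c1 then pvGoA (c1 :: rest) (counter + 1) else counter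
    | _ => 0
termination_by l.length
decreasing_by simp

def compressSingleBlock (S : String) (counter : Int) : Int := pvGoA S.toList counter

-- ===== PORT B =====
-- Source B's index loop 'while i+1 < n and S[i] == S[i+1]', walking the current char and the rest;
-- running off the end (i+1 = n) gives 1, a mismatch gives the accumulated counter.
def pvLoopB (c : Char) (rest : List Char) (counter : Int) : Int :=
  match rest with
  | [] => 1
  | d :: rest' => if c = d then pvLoopB d rest' (counter + 1) else counter

def compressSingleBlock_alt (S : String) (counter : Int) : Int :=
  match S.toList with
  | [] => 0   -- Python B raises IndexError here; excluded by Pre_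
  | c :: t =>
    if (c = '1' ∧ '0' ∉ (c :: t)) ∨ (c = '0' ∧ '1' ∉ (c :: t)) then ((c :: t).length : Int)
    else pvLoopB c t counter

-- ===== PRECONDITION & SPEC =====
-- Both Pythons raise IndexError (S[0]) on the empty string; Pre_ excludes exactly that input.
def Pre_compressSingleBlock (S : String) (counter : Int) : Prop := S.toList ≠ []
instance (S : String) (counter : Int) : Decidable (Pre_compressSingleBlock S counter) := by
  unfold Pre_compressSingleBlock; infer_instance
def pvWitness_compressSingleBlock : String × Int := ("1101", 0)

def Spec_compressSingleBlock (S : String) (counter : Int) (out : Int) : Prop := out = compressSingleBlock_alt S counter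
instance (S : String) (counter : Int) (out : Int) : Decidable (Spec_compressSingleBlock S counter out) := by unfold Spec_compressSingleBlock; infer_instance

-- ===== CLAIM (what is proved, stated in full; the proofs are below) =====
def Claim_equal_compressSingleBlock : Prop := ∀ (S : String) (counter : Int), Dom_compressSingleBlock S counter → Pre_compressSingleBlock S counter → Spec_compressSingleBlock S counter (compressSingleBlock S counter)

-- ===== LEMMAS AND PROOFS =====

-- When the "all bits the same" test holds, A returns the length (length-1 base included).
lemma pvGoA_bit (t : List Char) (c : Char) (counter : Int)
    (hB : (c = '1' ∧ '0' ∉ (c :: t)) ∨ (c = '0' ∧ '1' ∉ (c :: t))) :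
    pvGoA (c :: t) counter = ((c :: t).length : Int) := by
  cases t with
  | nil => simp [pvGoA]
  | cons d rest =>
    rw [pvGoA]
    have hlen : ¬ (c :: d :: rest).length = 1 := by simp
    rw [if_neg hlen, if_pos (by simpa using hB)]

-- When it does not hold at the head, it never starts holding while the run continues,
-- and A's remaining recursion is exactly B's loop.
lemma pvGoA_loop : ∀ (t : List Char) (c : Char) (counter : Int),
    ¬ ((c = '1' ∧ '0' ∉ (c :: t)) ∨ (c = '0' ∧ '1' ∉ (c :: t))) →
    pvGoA (c :: t) counter = pvLoopB c t counter := by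
  intro t
  induction t with
  | nil =>
    intro c counter _
    simp [pvGoA, pvLoopB]
  | cons d rest ih =>
    intro c counter hB
    rw [pvGoA, pvLoopB]
    have hlen : ¬ (c :: d :: rest).length = 1 := by simp
    rw [if_neg hlen]
    have hB' : ¬ (((c :: d :: rest).headD ' ' = '1' ∧ '0' ∉ (c :: d :: rest)) ∨
        ((c :: d :: rest).headD ' ' = '0' ∧ '1' ∉ (c :: d :: rest))) := by simpa using hB
    rw [if_neg hB']
    by_cases hc : c = d
    · subst hc
      rw [if_pos rfl, if_pos rfl]
      refine ih c (counter + 1) ?_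
      intro h
      apply hB
      rcases h with ⟨h1, h2⟩ | ⟨h1, h2⟩
      · exact Or.inl ⟨h1, by subst h1; simp only [List.mem_cons] at h2 ⊢; tauto⟩
      · exact Or.inr ⟨h1, by subst h1; simp only [List.mem_cons] at h2 ⊢; tauto⟩
    · rw [if_neg hc, if_neg hc]

-- ===== VERDICT (by name: the statement is the Claim_ definition above) =====
theorem compressSingleBlock_spec : Claim_equal_compressSingleBlock := by
  intro S counter _ hPre
  unfold Spec_compressSingleBlock compressSingleBlock compressSingleBlock_alt
  unfold Pre_compressSingleBlock at hPre
  cases h : S.toList with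
  | nil => exact absurd h hPre
  | cons c t =>
    change pvGoA (c :: t) counter =
      if (c = '1' ∧ '0' ∉ (c :: t)) ∨ (c = '0' ∧ '1' ∉ (c :: t)) then ((c :: t).length : Int)
      else pvLoopB c t counter
    by_cases hB : (c = '1' ∧ '0' ∉ (c :: t)) ∨ (c = '0' ∧ '1' ∉ (c :: t))
    · rw [if_pos hB]
      exact pvGoA_bit t c counter hB
    · rw [if_neg hB]
      exact pvGoA_loop t c counter hB
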